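-- pv_equiv track=rewrite | github.com/rodrigorahal/advent-of-code-2018 | 05/alchemial_reduction.py | search
-- ===== SOURCE A (Python) =====
-- def react(polymer):
--     stack = []
--     for a in polymer:
--         if stack and reacts(a, stack[-1]):
--             stack.pop()
--         else:
--             stack.append(a)
--     return stack
--
-- def reacts(a, b):
--     return a != b and a.lower() == b.lower()
--
-- def search(polymer):
--     units = set(u.lower() for u in polymer)
--     minlen = None
--     for unit in units:
--         curr = "".join([u for u in polymer if u.lower() != unit])
--         reacted = react(curr)
--         if not minlen or len(reacted) < minlen:
--             minlen = len(reacted)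
--     return minlen
-- ===== SOURCE B (Python) =====
-- def reacts(a, b):
--     return a != b and a.lower() == b.lower()
--
--
-- def _eliminate_pairs(chars):
--     """One left-to-right pass dropping disjoint adjacent reacting pairs."""
--     out = []
--     i = 0
--     n = len(chars)
--     while i < n:
--         if i + 1 < n and reacts(chars[i], chars[i + 1]):
--             i += 2
--         else:
--             out.append(chars[i])
--             i += 1
--     return out
--
--
-- def _reduced_length(chars):
--     """Repeat elimination passes until a fixpoint: the fully-reacted length."""
--     while True:
--         nxt = _eliminate_pairs(chars)
--         if len(nxt) == len(chars):
--             return len(chars)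
--         chars = nxt
--
--
-- def search(polymer):
--     units = {u.lower() for u in polymer}
--     lengths = [_reduced_length([u for u in polymer if u.lower() != unit])
--                for unit in units]
--     return min(lengths, default=None)
-- ===== Notes on version B (the rewrite author's own statement) =====
-- stated objective: alternative
-- what changed: react's single-pass stack reduction is replaced by repeated global adjacent-pair-elimination passes to a fixpoint (valid because pair elimination is confluent), and the running-minimum loop with its 'if not minlen' reset is replaced by building the list of reduced lengths and taking min(..., default=None).
-- outside the precondition, e.g. on search('aabB'): A returns 2, B returns 0
import Mathlib
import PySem

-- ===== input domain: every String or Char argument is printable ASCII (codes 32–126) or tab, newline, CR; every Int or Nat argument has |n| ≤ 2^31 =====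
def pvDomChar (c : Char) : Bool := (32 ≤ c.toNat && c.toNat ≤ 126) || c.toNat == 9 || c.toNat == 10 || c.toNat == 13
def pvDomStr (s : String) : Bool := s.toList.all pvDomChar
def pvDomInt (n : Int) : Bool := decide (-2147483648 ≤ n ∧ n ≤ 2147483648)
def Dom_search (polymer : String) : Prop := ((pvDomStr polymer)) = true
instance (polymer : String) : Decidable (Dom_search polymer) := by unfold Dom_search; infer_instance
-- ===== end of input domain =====

-- B replaces A's per-unit single-pass stack reduction by repeated adjacent-pair-elimination
-- passes to a fixpoint, and A's running-minimum loop by min over the list of reduced lengths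
-- (objective: alternative, not faster).

-- ===== PORT A =====
def reacts (a b : Char) : Bool :=
  a != b && (PySem.Chars.lowerChar a == PySem.Chars.lowerChar b)

-- one iteration of react's for-loop: `if stack and reacts(a, stack[-1]): pop else append`
def reactStep (stack : List Char) (a : Char) : List Char :=
  match stack.getLast? with
  | some t => if reacts a t then stack.dropLast else stack ++ [a]
  | none => stack ++ [a]

def react (polymer : List Char) : List Char := polymer.foldl reactStep []

def search (polymer : String) : Option Int :=
  let units : PySem.Set Char := PySem.Set.ofList (polymer.toList.map PySem.Chars.lowerChar)
  units.foldl (fun minlen unit =>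
    let curr := polymer.toList.filter (fun u => PySem.Chars.lowerChar u != unit)
    let reacted := react curr
    match minlen with
    | none => some (reacted.length : Int)
    | some m => if m == 0 || (reacted.length : Int) < m then some (reacted.length : Int) else some m)
    none

-- ===== PORT B =====
-- one left-to-right pass dropping disjoint adjacent reacting pairs (Source B's _eliminate_pairs)
def elimPass : List Char → List Char
  | a :: b :: rest => if reacts a b then elimPass rest else a :: elimPass (b :: rest)
  | l => l

-- cited by reducedLength's termination proof
theorem elimPass_length_le (l : List Char) : (elimPass l).length ≤ l.length := by
  induction l using elimPass.induct with
  | case1 a b rest h ih => simp only [elimPass, if_pos h, List.length_cons]; omega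
  | case2 a b rest h ih =>
    simp only [elimPass, if_neg h, List.length_cons] at *; omega
  | case3 l h =>
    match l, h with
    | [], _ => simp [elimPass]
    | [a], _ => simp [elimPass]
    | a :: b :: rest, h => exact absurd rfl (h a b rest)

-- repeat passes until the length stops shrinking (Source B's _reduced_length)
def reducedLength (chars : List Char) : Nat :=
  if (elimPass chars).length = chars.length then chars.length
  else reducedLength (elimPass chars)
termination_by chars.length
decreasing_by
  have h1 := elimPass_length_le chars
  omega

def search_alt (polymer : String) : Option Int :=
  let units : PySem.Set Char := PySem.Set.ofList (polymer.toList.map PySem.Chars.lowerChar)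
  let lengths : List Int := units.map (fun unit =>
    ((reducedLength (polymer.toList.filter (fun u => PySem.Chars.lowerChar u != unit))) : Int))
  PySem.List.min? lengths (fun x => x)

-- ===== PRECONDITION & SPEC =====
-- proof-side stack step (top of the stack at the head), used only by Pre_ and the lemmas below
def rstep (st : List Char) (a : Char) : List Char :=
  match st with
  | t :: st' => if reacts a t then st' else a :: t :: st'
  | [] => [a]

-- the fully-reacted length of the polymer with each unit type removed, one entry per distinct unit
def unitLens (polymer : String) : List Nat :=
  (PySem.Set.ofList (polymer.toList.map PySem.Chars.lowerChar)).map (fun unit =>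
    ((polymer.toList.filter (fun u => PySem.Chars.lowerChar u != unit)).foldl rstep []).length)

-- Pre_ excludes exactly the polymers for which removing some unit types makes the rest react
-- away completely while removing other unit types does not: there `if not minlen` resets A's
-- running minimum after a 0, so A's answer depends on Python's hash-randomized set iteration
-- order (a defensible-corner artefact no one would specify); B returns the plain minimum, 0.
def Pre_search (polymer : String) : Prop :=
  (∀ x ∈ unitLens polymer, x ≠ 0) ∨ (∀ x ∈ unitLens polymer, x = 0)

instance (polymer : String) : Decidable (Pre_search polymer) := by
  unfold Pre_search; infer_instance

def pvWitness_search : String := "dabAcCaCBAcCcaDA"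

def Spec_search (polymer : String) (out : Option Int) : Prop := out = search_alt polymer
instance (polymer : String) (out : Option Int) : Decidable (Spec_search polymer out) := by
  unfold Spec_search; infer_instance

-- ===== CLAIM (what is proved, stated in full; the proofs are below) =====
def Claim_equal_search : Prop :=
  ∀ (polymer : String), Dom_search polymer → Pre_search polymer →
    Spec_search polymer (search polymer)

-- ===== LEMMAS AND PROOFS =====
theorem reacts_comm (a b : Char) : reacts a b = reacts b a := by
  unfold reacts
  rw [bne_comm, Bool.beq_comm]

theorem isupper_toNat {c : Char} (h : PySem.Chars.isupper c = true) :
    65 ≤ c.toNat ∧ c.toNat ≤ 90 := by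
  simp only [PySem.Chars.isupper, Bool.and_eq_true, decide_eq_true_eq, Char.le_def] at h
  obtain ⟨h1, h2⟩ := h
  have g1 := UInt32.le_iff_toNat_le.mp h1
  have g2 := UInt32.le_iff_toNat_le.mp h2
  have e1 : ('A').val.toNat = 65 := by decide
  have e2 : ('Z').val.toNat = 90 := by decide
  rw [e1] at g1
  rw [e2] at g2
  exact ⟨g1, g2⟩

theorem lower_toNat_of_upper {c : Char} (h : PySem.Chars.isupper c = true) :
    (PySem.Chars.lowerChar c).toNat = c.toNat + 32 := by
  have hb := isupper_toNat h
  have hv : (c.toNat + 32).isValidChar := Or.inl (by omega)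
  simp [PySem.Chars.lowerChar, h, Char.toNat_ofNat, hv]

theorem lower_of_not_upper {c : Char} (h : PySem.Chars.isupper c = false) :
    PySem.Chars.lowerChar c = c := by
  simp [PySem.Chars.lowerChar, h]

theorem char_eq_of_toNat {a b : Char} (h : a.toNat = b.toNat) : a = b :=
  Char.ext (UInt32.toNat_inj.mp h)

theorem lowerChar_pair {a b : Char} (h : PySem.Chars.lowerChar a = PySem.Chars.lowerChar b)
    (hne : a ≠ b) :
    (PySem.Chars.isupper a = true ∧ PySem.Chars.isupper b = false ∧ a.toNat + 32 = b.toNat) ∨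
    (PySem.Chars.isupper b = true ∧ PySem.Chars.isupper a = false ∧ b.toNat + 32 = a.toNat) := by
  have htn : (PySem.Chars.lowerChar a).toNat = (PySem.Chars.lowerChar b).toNat := by rw [h]
  cases ha : PySem.Chars.isupper a <;> cases hb : PySem.Chars.isupper b
  · rw [lower_of_not_upper ha, lower_of_not_upper hb] at h
    exact absurd h hne
  · right
    refine ⟨rfl, rfl, ?_⟩
    rw [lower_of_not_upper ha] at htn
    rw [lower_toNat_of_upper hb] at htn
    omega
  · left
    refine ⟨rfl, rfl, ?_⟩
    rw [lower_toNat_of_upper ha, lower_of_not_upper hb] at htn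
    omega
  · rw [lower_toNat_of_upper ha, lower_toNat_of_upper hb] at htn
    exact absurd (char_eq_of_toNat (by omega)) hne

theorem reacts_triple {a b t : Char} (hab : reacts a b = true) (hat : reacts a t = true) :
    b = t := by
  by_cases hbt : b = t
  · exact hbt
  · simp only [reacts, Bool.and_eq_true, bne_iff_ne, ne_eq, beq_iff_eq] at hab hat
    obtain ⟨hab1, hab2⟩ := hab
    obtain ⟨hat1, hat2⟩ := hat
    rcases lowerChar_pair hab2 hab1 with ⟨u1, u2, e⟩ | ⟨u1, u2, e⟩ <;>
      rcases lowerChar_pair hat2 hat1 with ⟨v1, v2, f⟩ | ⟨v1, v2, f⟩ <;>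
      first
        | (exact char_eq_of_toNat (by omega))
        | (rw [u1] at v2; exact absurd v2 (by simp)) 
        | (rw [u2] at v1; exact absurd v1 (by simp))

def StkInv (st : List Char) : Prop := List.IsChain (fun x y => reacts x y = false) st

theorem inv_rstep {st : List Char} (a : Char) (h : StkInv st) : StkInv (rstep st a) := by
  match st with
  | [] => exact List.isChain_singleton a
  | t :: st' =>
    show StkInv (if reacts a t then st' else a :: t :: st')
    split_ifs with hr
    · exact h.tail
    · exact List.isChain_cons_cons.mpr ⟨by simp [hr], h⟩


theorem reactStep_eq_rstep (st : List Char) (a : Char) :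
    reactStep st a = (rstep st.reverse a).reverse := by
  induction st using List.reverseRecOn with
  | nil => simp [reactStep, rstep]
  | append_singleton xs t ih =>
    simp only [reactStep, List.getLast?_concat, List.reverse_append, List.reverse_cons,
      List.reverse_nil, List.nil_append, List.singleton_append, rstep]
    split_ifs with hr
    · simp
    · simp

theorem react_eq_rfold (l : List Char) (st : List Char) :
    l.foldl reactStep st = (l.foldl rstep st.reverse).reverse := by
  induction l generalizing st with
  | nil => simp
  | cons a l ih =>
    simp only [List.foldl_cons]
    rw [reactStep_eq_rstep, ih, List.reverse_reverse]

theorem rfold_cancel {st : List Char} {a b : Char} (ys : List Char)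
    (hst : StkInv st) (hab : reacts a b = true) :
    (a :: b :: ys).foldl rstep st = ys.foldl rstep st := by
  match st with
  | [] =>
    simp only [List.foldl_cons, rstep]
    rw [reacts_comm] at hab
    simp [hab]
  | t :: st' =>
    simp only [List.foldl_cons]
    by_cases hat : reacts a t = true
    · have hbt : b = t := reacts_triple hab hat
      subst hbt
      simp only [rstep, if_pos hat]
      match st' with
      | [] => simp [rstep]
      | u :: st'' =>
        have hbu : reacts b u = false := by
          exact (List.isChain_cons_cons.mp hst).1
        simp [rstep, hbu]
    · simp only [rstep, if_neg hat]
      have hba : reacts b a = true := by rwa [reacts_comm] at hab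
      simp [rstep, hba]

theorem rfold_irreducible (l : List Char) : ∀ st : List Char,
    List.IsChain (fun x y => reacts x y = false) (st.reverse ++ l) →
    l.foldl rstep st = l.reverse ++ st := by
  induction l with
  | nil => intro st _; simp
  | cons a rest ih =>
    intro st h
    match st with
    | [] =>
      simp only [List.foldl_cons, rstep]
      rw [ih [a] (by simpa using h)]
      simp
    | t :: st' =>
      have hta : reacts t a = false := by
        have h1 : List.IsChain (fun x y => reacts x y = false) ((st'.reverse ++ [t]) ++ a :: rest) := by
          simpa using h
        have hsplit := (List.isChain_append.mp h1).2.2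
        exact hsplit t (by simp [List.getLast?_concat]) a (by simp)
      have hat : reacts a t = false := by rwa [reacts_comm]
      simp only [List.foldl_cons, rstep, hat, Bool.false_eq_true, if_false]
      rw [ih (a :: t :: st') (by simpa using h)]
      simp

theorem rfold_elimPass (l : List Char) : ∀ st : List Char, StkInv st →
    (elimPass l).foldl rstep st = l.foldl rstep st := by
  induction l using elimPass.induct with
  | case1 a b rest h ih =>
    intro st hst
    rw [elimPass, if_pos h, ih st hst, rfold_cancel rest hst h]
  | case2 a b rest h ih =>
    intro st hst
    rw [elimPass, if_neg h]
    simp only [List.foldl_cons]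
    exact ih (rstep st a) (inv_rstep a hst)
  | case3 l h =>
    intro st _
    match l, h with
    | [], _ => rfl
    | [a], _ => rfl
    | a :: b :: rest, h => exact absurd rfl (h a b rest)

theorem elimPass_eq_of_length (l : List Char) (h : (elimPass l).length = l.length) :
    elimPass l = l := by
  induction l using elimPass.induct with
  | case1 a b rest hr ih =>
    exfalso
    rw [elimPass, if_pos hr] at h
    have := elimPass_length_le rest
    simp only [List.length_cons] at h
    omega
  | case2 a b rest hr ih =>
    rw [elimPass, if_neg hr] at h ⊢
    simp only [List.length_cons] at h
    rw [ih (by simp only [List.length_cons]; omega)]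
  | case3 l h' =>
    match l, h' with
    | [], _ => rfl
    | [a], _ => rfl
    | a :: b :: rest, h' => exact absurd rfl (h' a b rest)

theorem chain'_of_elimPass_eq (l : List Char) (h : elimPass l = l) :
    List.IsChain (fun x y => reacts x y = false) l := by
  induction l using elimPass.induct with
  | case1 a b rest hr ih =>
    exfalso
    rw [elimPass, if_pos hr] at h
    have := elimPass_length_le rest
    have hl := congrArg List.length h
    simp only [List.length_cons] at hl
    omega
  | case2 a b rest hr ih =>
    rw [elimPass, if_neg hr] at h
    have h2 : elimPass (b :: rest) = b :: rest := by
      injection h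
    exact List.isChain_cons_cons.mpr ⟨by simp [hr], ih h2⟩
  | case3 l h' =>
    match l, h' with
    | [], _ => exact List.isChain_nil
    | [a], _ => exact List.isChain_singleton a
    | a :: b :: rest, h' => exact absurd rfl (h' a b rest)

theorem reducedLength_eq_rfold (l : List Char) :
    reducedLength l = (l.foldl rstep []).length := by
  induction l using reducedLength.induct with
  | case1 chars hfix =>
    rw [reducedLength, if_pos hfix]
    have heq := elimPass_eq_of_length chars hfix
    have hch := chain'_of_elimPass_eq chars heq
    rw [rfold_irreducible chars [] (by simpa using hch)]
    simp
  | case2 chars hfix ih =>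
    rw [reducedLength, if_neg hfix, ih,
      rfold_elimPass chars [] List.isChain_nil]

def aStep (minlen : Option Int) (x : Int) : Option Int :=
  match minlen with
  | none => some x
  | some m => if m == 0 || x < m then some x else some m

def mStep (minlen : Option Int) (x : Int) : Option Int :=
  match minlen with
  | none => some x
  | some m => if x < m then some x else some m

theorem fold_eq_nonzero (t : List Int) : ∀ v : Int, v ≠ 0 → (∀ x ∈ t, x ≠ 0) →
    t.foldl aStep (some v) = t.foldl mStep (some v) := by
  induction t with
  | nil => intro v _ _; rfl
  | cons x t ih =>
    intro v hv ht
    have hx : x ≠ 0 := ht x (by simp)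
    have ht' : ∀ y ∈ t, y ≠ 0 := fun y hy => ht y (by simp [hy])
    simp only [List.foldl_cons]
    have hstep : aStep (some v) x = mStep (some v) x := by
      simp [aStep, mStep, hv]
    rw [hstep]
    by_cases hlt : x < v
    · simp only [mStep, if_pos hlt]
      exact ih x hx ht'
    · simp only [mStep, if_neg hlt]
      exact ih v hv ht'

theorem fold_eq_zero (t : List Int) (ht : ∀ x ∈ t, x = 0) :
    t.foldl aStep (some 0) = some 0 ∧ t.foldl mStep (some 0) = some 0 := by
  induction t with
  | nil => exact ⟨rfl, rfl⟩
  | cons x t ih =>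
    have hx : x = 0 := ht x (by simp)
    subst hx
    have ht' : ∀ y ∈ t, y = 0 := fun y hy => ht y (by simp [hy])
    simp only [List.foldl_cons, aStep, mStep]
    simpa using ih ht'

theorem fold_min_eq (lens : List Int)
    (h : (∀ x ∈ lens, x ≠ 0) ∨ (∀ x ∈ lens, x = 0)) :
    lens.foldl aStep none = PySem.List.min? lens (fun x => x) := by
  match lens with
  | [] => rfl
  | x :: t =>
    have hmin : PySem.List.min? (x :: t) (fun y => y) = t.foldl mStep (some x) := by
      simp only [PySem.List.min?, List.foldl_cons]
      apply PySem.List.foldl_congr_mem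
      intro acc y _
      cases acc <;> rfl
    rw [hmin]
    simp only [List.foldl_cons]
    have hx0 : aStep none x = some x := rfl
    rw [hx0]
    rcases h with h | h
    · exact fold_eq_nonzero t x (h x (by simp)) (fun y hy => h y (by simp [hy]))
    · have hx : x = 0 := h x (by simp)
      subst hx
      have := fold_eq_zero t (fun y hy => h y (by simp [hy]))
      rw [this.1, this.2]

theorem lens_agree (curr : List Char) :
    (react curr).length = (curr.foldl rstep []).length ∧
    reducedLength curr = (curr.foldl rstep []).length := by
  constructor
  · rw [react, react_eq_rfold curr []]
    simp
  · exact reducedLength_eq_rfold curr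

theorem search_eq (polymer : String) :
    search polymer = ((unitLens polymer).map (fun n : Nat => (n : Int))).foldl aStep none := by
  unfold search unitLens
  dsimp only
  rw [List.map_map, List.foldl_map]
  apply PySem.List.foldl_congr_mem
  intro acc u _
  show aStep acc ((react (polymer.toList.filter fun c => PySem.Chars.lowerChar c != u)).length : Int) =
    aStep acc (((polymer.toList.filter fun c => PySem.Chars.lowerChar c != u).foldl rstep []).length : Int)
  rw [(lens_agree _).1]

theorem search_alt_eq (polymer : String) :
    search_alt polymer =
      PySem.List.min? ((unitLens polymer).map (fun n : Nat => (n : Int))) (fun x => x) := by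
  unfold search_alt unitLens
  dsimp only
  rw [List.map_map]
  congr 1
  apply List.map_congr_left
  intro u _
  show ((reducedLength _ : Nat) : Int) = (((_ : List Char).foldl rstep []).length : Int)
  rw [(lens_agree _).2]

-- ===== VERDICT (by name: the statement is the Claim_ definition above) =====
theorem search_spec : Claim_equal_search := by
  unfold Claim_equal_search Spec_search
  intro polymer _ hpre
  rw [search_eq, search_alt_eq]
  apply fold_min_eq
  rcases hpre with h | h
  · left
    intro x hx
    obtain ⟨n, hn, rfl⟩ := List.mem_map.mp hx
    exact_mod_cast h n hn
  · right
    intro x hx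
    obtain ⟨n, hn, rfl⟩ := List.mem_map.mp hx
    exact_mod_cast h n hn
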